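-- pv_equiv track=rewrite | github.com/KumarAbhinav2/CodingProblems | Arrays/sub_array_with_0_sum.py | subArraySum_intuitive
-- ===== SOURCE A (Python) =====
-- def subArraySum_intuitive(arr):
--     subsets = []
--     for i in range(len(arr)):
--         temp_arr = []
--         my_sum = 0
--         for j in range(i, len(arr)):
--             temp_arr.append(arr[j])
--             my_sum = my_sum + arr[j]
--             if my_sum == 0:
--                 subsets.append(temp_arr.copy())
--     return subsets
-- ===== SOURCE B (Python) =====
-- def subArraySum_intuitive(arr):
--     n = len(arr)
--     prefix = [0]
--     for x in arr:
--         prefix.append(prefix[-1] + x)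
--     idx = {}
--     for k, p in enumerate(prefix):
--         idx[p] = idx.get(p, []) + [k]
--     result = []
--     for i in range(n):
--         for k in idx[prefix[i]]:
--             if k > i:
--                 result.append(arr[i:k])
--     return result
-- ===== Notes on version B (the rewrite author's own statement) =====
-- stated objective: faster
-- what changed: Replaces the nested running-sum scan with a prefix-sum array plus a dict mapping each prefix value to its ascending index list, so each start index only visits the ends that actually give a zero sum.
import Mathlib
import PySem

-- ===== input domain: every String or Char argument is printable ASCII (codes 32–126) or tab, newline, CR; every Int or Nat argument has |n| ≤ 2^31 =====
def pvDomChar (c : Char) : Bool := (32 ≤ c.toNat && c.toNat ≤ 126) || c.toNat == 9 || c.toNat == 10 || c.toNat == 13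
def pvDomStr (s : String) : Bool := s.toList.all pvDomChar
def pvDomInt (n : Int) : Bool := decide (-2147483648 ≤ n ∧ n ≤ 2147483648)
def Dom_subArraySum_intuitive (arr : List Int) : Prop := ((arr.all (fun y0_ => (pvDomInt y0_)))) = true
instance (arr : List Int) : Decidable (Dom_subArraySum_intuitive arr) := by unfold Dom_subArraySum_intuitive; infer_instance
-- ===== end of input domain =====

-- B replaces A's nested running-sum scan by a prefix-sum array plus a dict from prefix value to its
-- ascending index list, so each start index only visits the ends that give a zero sum (faster).

-- ===== PORT A =====
-- literal port of A: for each start i, grow temp_arr and my_sum over j = i..n-1, appending a copy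
-- of temp_arr whenever my_sum == 0; arr[j] is ported as arr.getD j 0 (j is always in range here)
def subArraySum_intuitive (arr : List Int) : List (List Int) :=
  (List.range arr.length).foldl (fun subsets i =>
    ((List.range' i (arr.length - i)).foldl
      (fun (st : List Int × Int × List (List Int)) j =>
        let temp := st.1 ++ [arr.getD j 0]
        let s := st.2.1 + arr.getD j 0
        (temp, s, if s = 0 then st.2.2 ++ [temp] else st.2.2))
      ([], 0, subsets)).2.2) []

-- ===== PORT B =====
-- literal port of Source B: prefix-sum list, dict prefix-value -> ascending index list (enumerate is
-- ported as zipIdx, indices as Nat), then for each i emit arr[i:k] for the indexed k > i;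
-- prefix[i] and idx[prefix[i]] are ported with getD (index/key always present)
def subArraySum_intuitive_alt (arr : List Int) : List (List Int) :=
  let pre := arr.foldl (fun ps x => ps ++ [ps.getLastD 0 + x]) [0]
  let idx := pre.zipIdx.foldl (fun d p => d.modify p.1 [] (fun l => l ++ [p.2])) PySem.Dict.empty
  (List.range arr.length).foldl (fun res i =>
    (idx.getD (pre.getD i 0) []).foldl
      (fun res k => if i < k then res ++ [PySem.List.slice arr (some (i : Int)) (some (k : Int))] else res)
      res) []

-- ===== PRECONDITION & SPEC =====
def Spec_subArraySum_intuitive (arr : List Int) (out : List (List Int)) : Prop := out = subArraySum_intuitive_alt arr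
instance (arr : List Int) (out : List (List Int)) : Decidable (Spec_subArraySum_intuitive arr out) := by unfold Spec_subArraySum_intuitive; infer_instance

-- ===== CLAIM (what is proved, stated in full; the proofs are below) =====
def Claim_equal_subArraySum_intuitive : Prop := ∀ (arr : List Int), Dom_subArraySum_intuitive arr → Spec_subArraySum_intuitive arr (subArraySum_intuitive arr)

-- ===== LEMMAS AND PROOFS =====

-- prefix sum P k = sum of arr[0:k]
def pvP (arr : List Int) (k : Nat) : Int := (arr.take k).sum

-- the subarray arr[i:k]
def pvSeg (arr : List Int) (i k : Nat) : List Int := (arr.drop i).take (k - i)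

-- contribution of start index i to the common canonical result
def pvG (arr : List Int) (i : Nat) : List (List Int) :=
  ((List.range' (i+1) (arr.length - i)).filter (fun k => pvP arr k == pvP arr i)).map (pvSeg arr i)

theorem pvGetD_eq (arr : List Int) (k : Nat) (hk : k < arr.length) :
    arr.getD k 0 = arr[k] := by
  rw [List.getD_eq_getElem?_getD, List.getElem?_eq_getElem hk]; rfl

theorem pvP_succ (arr : List Int) (k : Nat) (hk : k < arr.length) :
    pvP arr (k+1) = pvP arr k + arr.getD k 0 := by
  unfold pvP
  rw [List.take_add_one, List.getElem?_eq_getElem hk, List.sum_append, pvGetD_eq arr k hk]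
  simp

theorem seg_succ (arr : List Int) (i m : Nat) (h : i + m < arr.length) :
    (arr.drop i).take m ++ [arr.getD (i+m) 0] = (arr.drop i).take (m+1) := by
  rw [List.take_add_one, List.getElem?_drop, List.getElem?_eq_getElem h, pvGetD_eq arr (i+m) h]
  rfl

-- A's inner loop characterised: temp_arr, my_sum and the appended subsets after the whole scan
theorem A_inner (arr : List Int) (i : Nat) (m : Nat) (hm : i + m ≤ arr.length) (acc : List (List Int)) :
    (List.range' i m).foldl
      (fun (st : List Int × Int × List (List Int)) j =>
        let temp := st.1 ++ [arr.getD j 0]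
        let s := st.2.1 + arr.getD j 0
        (temp, s, if s = 0 then st.2.2 ++ [temp] else st.2.2))
      ([], 0, acc)
    = ((arr.drop i).take m, pvP arr (i+m) - pvP arr i,
       acc ++ ((List.range' (i+1) m).filter (fun k => pvP arr k == pvP arr i)).map (pvSeg arr i)) := by
  induction m with
  | zero => simp
  | succ m ih =>
    have hm' : i + m ≤ arr.length := by omega
    have hlt : i + m < arr.length := by omega
    rw [List.range'_concat, List.foldl_append, ih hm']
    simp only [Nat.one_mul, List.foldl_cons, List.foldl_nil]
    have hseg : (arr.drop i).take m ++ [arr.getD (i+m) 0] = (arr.drop i).take (m+1) :=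
      seg_succ arr i m hlt
    have hsum : pvP arr (i+m) - pvP arr i + arr.getD (i+m) 0 = pvP arr (i+m+1) - pvP arr i := by
      have := pvP_succ arr (i+m) hlt; omega
    have hE : i + 1 + m = i + m + 1 := by omega
    have hfil : (List.range' (i+1) (m+1)).filter (fun k => pvP arr k == pvP arr i)
        = (List.range' (i+1) m).filter (fun k => pvP arr k == pvP arr i)
          ++ if (pvP arr (i+m+1) == pvP arr i) = true then [i+m+1] else [] := by
      rw [List.range'_concat]
      simp only [Nat.one_mul, List.filter_append, List.filter_cons, List.filter_nil, hE]
    refine Prod.ext ?_ (Prod.ext ?_ ?_)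
    · simpa using hseg
    · simpa using hsum
    · simp only []
      rw [hfil, List.map_append]
      by_cases h0 : pvP arr (i+m+1) = pvP arr i
      · rw [if_pos (by omega : pvP arr (i+m) - pvP arr i + arr.getD (i+m) 0 = 0),
            if_pos (by simp [h0])]
        have hsg : pvSeg arr i (i+m+1) = (arr.drop i).take (m+1) := by
          unfold pvSeg; congr 1; omega
        simp [hsg, ← hseg, List.append_assoc]
      · rw [if_neg (by omega : ¬ (pvP arr (i+m) - pvP arr i + arr.getD (i+m) 0 = 0)),
            if_neg (by simp [h0])]
        simp

theorem A_eq (arr : List Int) :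
    subArraySum_intuitive arr = (List.range arr.length).flatMap (pvG arr) := by
  unfold subArraySum_intuitive
  rw [PySem.List.foldl_congr_mem (List.range arr.length) _ (fun acc i => acc ++ pvG arr i) []
    (by
      intro acc i hi
      rw [List.mem_range] at hi
      have := A_inner arr i (arr.length - i) (by omega) acc
      simp only [this, pvG])]
  exact PySem.List.foldl_append_eq_flatMap _ _ _

-- B-side: the prefix list built by the fold, as a scan
def pvScan (s : Int) : List Int → List Int
  | [] => []
  | x :: l => (s + x) :: pvScan (s + x) l

theorem prefix_foldl (l : List Int) : ∀ (ps : List Int), ps ≠ [] →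
    l.foldl (fun ps x => ps ++ [ps.getLastD 0 + x]) ps = ps ++ pvScan (ps.getLastD 0) l := by
  induction l with
  | nil => intro ps _; simp [pvScan]
  | cons x l ih =>
    intro ps hps
    rw [List.foldl_cons, ih (ps ++ [ps.getLastD 0 + x]) (by simp)]
    have h : (ps ++ [ps.getLastD 0 + x]).getLastD 0 = ps.getLastD 0 + x := by
      simp
    rw [h]
    simp [pvScan]

theorem pvScan_eq (l : List Int) : ∀ (s : Int),
    pvScan s l = (List.range l.length).map (fun k => s + (l.take (k+1)).sum) := by
  induction l with
  | nil => intro s; simp [pvScan]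
  | cons x l ih =>
    intro s
    simp only [pvScan, List.length_cons, List.range_succ_eq_map, List.map_cons, List.map_map]
    congr 1
    · simp
    · rw [ih (s + x)]
      apply List.map_congr_left
      intro k _
      simp [Function.comp, List.take_succ_cons, add_assoc]

theorem prefix_eq (arr : List Int) :
    arr.foldl (fun ps x => ps ++ [ps.getLastD 0 + x]) [0]
      = (List.range (arr.length + 1)).map (pvP arr) := by
  rw [prefix_foldl arr [0] (by simp)]
  have h0 : ([(0:Int)]).getLastD 0 = 0 := rfl
  rw [h0, pvScan_eq, List.range_succ_eq_map]
  simp [pvP]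

-- zipIdx of a mapped range, filtered on the value, yields the filtered range of indices
theorem zip_filter (f : Nat → Int) (v : Int) : ∀ (m s : Nat),
    ((((List.range' s m).map f).zipIdx s).filter (fun p => p.1 == v)).map (fun p => p.2)
      = (List.range' s m).filter (fun k => f k == v) := by
  intro m
  induction m with
  | zero => intro s; simp
  | succ m ih =>
    intro s
    rw [List.range'_succ]
    simp only [List.map_cons, List.zipIdx_cons, List.filter_cons]
    by_cases h : (f s == v) = true <;> simp [h, ih (s+1)]

-- among all ends k ≤ n, those greater than i form range' (i+1) (n-i)
theorem range_filter_gt (n i : Nat) (hi : i < n) (q : Nat → Bool) :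
    ((List.range' 0 (n+1)).filter (fun k => q k)).filter (fun k => decide (i < k))
      = (List.range' (i+1) (n - i)).filter (fun k => q k) := by
  rw [List.filter_filter]
  have hsplit : List.range' 0 (n+1) = List.range' 0 (i+1) ++ List.range' (i+1) (n - i) := by
    have h := List.range'_append (s := 0) (m := i+1) (n := n - i) (step := 1)
    simp only [Nat.one_mul, Nat.zero_add] at h
    rw [(by omega : i + 1 + (n - i) = n + 1)] at h
    exact h.symm
  rw [hsplit, List.filter_append]
  have h1 : (List.range' 0 (i+1)).filter (fun k => decide (i < k) && q k) = [] := by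
    rw [List.filter_eq_nil_iff]
    intro k hk
    rw [List.mem_range'_1] at hk
    simp; omega
  have h2 : (List.range' (i+1) (n - i)).filter (fun k => decide (i < k) && q k)
      = (List.range' (i+1) (n - i)).filter (fun k => q k) := by
    apply List.filter_congr
    intro k hk
    rw [List.mem_range'_1] at hk
    simp; omega
  rw [h1, h2, List.nil_append]

theorem B_eq (arr : List Int) :
    subArraySum_intuitive_alt arr = (List.range arr.length).flatMap (pvG arr) := by
  unfold subArraySum_intuitive_alt
  simp only [prefix_eq arr]
  rw [PySem.List.foldl_congr_mem (List.range arr.length) _ (fun res i => res ++ pvG arr i) []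
    (by
      intro res i hi
      rw [List.mem_range] at hi
      have hpre : ((List.range (arr.length + 1)).map (pvP arr)).getD i 0 = pvP arr i :=
        PySem.List.getD_map_range (pvP arr) (arr.length + 1) i 0 (by omega)
      rw [hpre]
      have hidx : (((List.range (arr.length + 1)).map (pvP arr)).zipIdx.foldl
            (fun d p => d.modify p.1 [] (fun l => l ++ [p.2])) PySem.Dict.empty).getD (pvP arr i) []
          = (List.range' 0 (arr.length + 1)).filter (fun k => pvP arr k == pvP arr i) := by
        rw [PySem.Dict.getD_foldl_modify_append, PySem.Dict.getD_empty, List.nil_append]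
        rw [List.range_eq_range']
        exact zip_filter (pvP arr) (pvP arr i) (arr.length + 1) 0
      rw [hidx]
      have hfold : ∀ (ks : List Nat) (res : List (List Int)),
          ks.foldl (fun res k => if i < k then res ++ [PySem.List.slice arr (some (i : Int)) (some (k : Int))] else res) res
            = res ++ (ks.filter (fun k => decide (i < k))).map (fun k => pvSeg arr i k) := by
        intro ks
        induction ks with
        | nil => intro res; simp
        | cons k ks ihk =>
          intro res
          rw [List.foldl_cons, List.filter_cons]
          by_cases hk : i < k
          · rw [if_pos hk, ihk]
            simp [hk, pvSeg, PySem.List.slice_natCast]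
          · rw [if_neg hk, ihk]
            simp [hk]
      rw [hfold, range_filter_gt arr.length i hi]
      rfl)]
  exact PySem.List.foldl_append_eq_flatMap _ _ _

-- ===== VERDICT (by name: the statement is the Claim_ definition above) =====
theorem subArraySum_intuitive_spec : Claim_equal_subArraySum_intuitive := by
  intro arr _
  unfold Spec_subArraySum_intuitive
  rw [A_eq, B_eq]
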